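-- pv_equiv track=rewrite | github.com/tscalfaro/UMGC | CMIS 102/ScalfaroAntonio_Wk6 Discussion.py | countInitials
-- ===== SOURCE A (Python) =====
-- def countInitials(thisString):
--     #Set my initials
--     initials = 'acs'
--     count = 0
--     #Lower case and seperate string on whitespace
--     seperatedString = thisString.lower().split()
--
--     #Check each word for initials in them and incriment count accordingly
--     for word in seperatedString:
--         if initials in word:
--             #Count initials occurrence in each word, add it to count
--             countInWord = word.count(initials)
--             count += countInWord
--     return count
-- ===== SOURCE B (Python) =====
-- def countInitials(thisString):
--     # 'acs' contains no whitespace, so occurrences never span word boundaries: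
--     # count over the whole lowercased string in one pass.
--     return thisString.lower().count('acs')
-- ===== Notes on version B (the rewrite author's own statement) =====
-- stated objective: simpler
-- what changed: Replaced the split-into-words loop with guard and per-word accumulation by a single whole-string substring count on the lowercased input; since 'acs' contains no whitespace, word splitting cannot change the total.
import Mathlib
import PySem

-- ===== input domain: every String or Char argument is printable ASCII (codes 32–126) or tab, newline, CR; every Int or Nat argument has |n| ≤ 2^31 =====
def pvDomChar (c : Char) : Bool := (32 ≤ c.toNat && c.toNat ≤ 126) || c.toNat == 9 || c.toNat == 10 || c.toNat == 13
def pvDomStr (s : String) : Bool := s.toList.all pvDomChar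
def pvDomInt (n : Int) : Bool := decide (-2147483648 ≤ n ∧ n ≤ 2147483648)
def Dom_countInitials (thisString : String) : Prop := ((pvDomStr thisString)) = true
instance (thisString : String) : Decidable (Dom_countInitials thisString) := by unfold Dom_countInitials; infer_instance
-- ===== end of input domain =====

-- B replaces A's split/loop/guard word accumulation by one whole-string substring count (simpler; 'acs' has no whitespace, so word splitting cannot change the total).

-- ===== PORT A =====
def countInitials (thisString : String) : Int :=
  let initials : String := "acs"
  let count : Int := 0
  let seperatedString : List String := PySem.Str.split₀ (PySem.Str.lower thisString)
  seperatedString.foldl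
    (fun count word =>
      if PySem.Str.isIn initials word = true then
        let countInWord : Int := (PySem.Str.count word initials : Nat)
        count + countInWord
      else count)
    count

-- ===== PORT B =====
def countInitials_alt (thisString : String) : Int :=
  ((PySem.Str.count (PySem.Str.lower thisString) "acs" : Nat) : Int)

-- ===== PRECONDITION & SPEC =====
def Spec_countInitials (thisString : String) (out : Int) : Prop := out = countInitials_alt thisString
instance (thisString : String) (out : Int) : Decidable (Spec_countInitials thisString out) := by unfold Spec_countInitials; infer_instance

-- ===== CLAIM (what is proved, stated in full; the proofs are below) =====
def Claim_equal_countInitials : Prop := ∀ (thisString : String), Dom_countInitials thisString → Spec_countInitials thisString (countInitials thisString)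

-- ===== LEMMAS AND PROOFS =====

-- Fuel-free version of Python's non-overlapping greedy substring count, specialised to 'acs'.
def cntAcs : List Char → Nat
  | [] => 0
  | c :: t =>
    if ['a', 'c', 's'].isPrefixOf (c :: t) then cntAcs ((c :: t).drop 3) + 1 else cntAcs t
termination_by l => l.length
decreasing_by
  all_goals simp only [List.length_drop, List.length_cons]
  all_goals omega

theorem count_go_eq_cntAcs (fuel : Nat) (l : List Char) (acc : Nat) (h : l.length ≤ fuel) :
    PySem.Chars.count.go ['a', 'c', 's'] fuel l acc = acc + cntAcs l := by
  induction fuel generalizing l acc with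
  | zero =>
    have hl : l = [] := List.eq_nil_of_length_eq_zero (Nat.le_zero.mp h)
    subst hl
    simp [PySem.Chars.count.go, cntAcs]
  | succ n ih =>
    cases l with
    | nil => simp [PySem.Chars.count.go, cntAcs]
    | cons c t =>
      simp only [PySem.Chars.count.go]
      by_cases hp : ['a', 'c', 's'].isPrefixOf (c :: t) = true
      · rw [if_pos hp]
        have h3 : (['a', 'c', 's'] : List Char).length = 3 := rfl
        rw [h3]
        rw [ih _ _ (by simp at h ⊢; omega)]
        rw [cntAcs]; rw [if_pos hp]; omega
      · rw [if_neg hp]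
        rw [ih _ _ (by simp at h; omega)]
        rw [cntAcs]; rw [if_neg hp]

theorem count_eq_cntAcs (l : List Char) : PySem.Chars.count l ['a', 'c', 's'] = cntAcs l := by
  rw [PySem.Chars.count]
  rw [if_neg (by simp)]
  rw [count_go_eq_cntAcs l.length l 0 le_rfl]
  omega

theorem cntAcs_cons_space (c : Char) (t : List Char) (hc : PySem.Chars.isspace c = true) :
    cntAcs (c :: t) = cntAcs t := by
  have hne : ('a' == c) = false := by
    by_cases h : c = 'a'
    · subst h; exact absurd hc (by decide)
    · simp [Ne.symm h]
  rw [cntAcs, if_neg (by simp [List.isPrefixOf, hne])]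

theorem cntAcs_append (n : Nat) (w r : List Char) (hn : w.length ≤ n)
    (hw : ∀ c ∈ w, PySem.Chars.isspace c = false)
    (hr : r = [] ∨ ∃ c t, r = c :: t ∧ PySem.Chars.isspace c = true) :
    cntAcs (w ++ r) = cntAcs w + cntAcs r := by
  induction n generalizing w with
  | zero =>
    have : w = [] := by
      cases w with
      | nil => rfl
      | cons a b => simp at hn
    subst this; simp [cntAcs]
  | succ n ih =>
    cases w with
    | nil => simp [cntAcs]
    | cons c t =>
      by_cases hp : ['a', 'c', 's'].isPrefixOf (c :: t ++ r) = true
      · -- the match lies entirely inside the word: |c::t| ≥ 3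
        have hlen : 3 ≤ (c :: t).length := by
          by_contra hlt
          rw [Nat.not_le] at hlt
          simp only [List.length_cons] at hlt
          -- then the 2nd or 3rd matched char is r's head, a space — impossible
          rcases hr with hnil | ⟨d, u, rfl, hd⟩
          · subst hnil
            rw [List.append_nil] at hp
            have := (List.isPrefixOf_iff_prefix.mp hp).length_le
            simp at this
            omega
          · cases t with
            | nil =>
              simp [List.isPrefixOf] at hp
              obtain ⟨-, h2, -⟩ := hp
              rw [← h2] at hd; exact absurd hd (by decide)
            | cons c2 t2 =>
              cases t2 with
              | nil =>
                simp [List.isPrefixOf] at hp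
                obtain ⟨-, -, h3⟩ := hp
                rw [← h3] at hd; exact absurd hd (by decide)
              | cons c3 t3 => simp at hlt; omega
        have hpw : ['a', 'c', 's'].isPrefixOf (c :: t) = true := by
          rw [List.isPrefixOf_iff_prefix] at hp ⊢
          rcases hp with ⟨s2, hs2⟩
          refine ⟨(c :: t).drop 3, ?_⟩
          have htake : (c :: t ++ r).take 3 = (c :: t).take 3 := List.take_append_of_le_length hlen
          have h1 : ['a', 'c', 's'] = (c :: t).take 3 := by
            rw [← htake, ← hs2]
            simp
          rw [h1]; exact List.take_append_drop 3 (c :: t)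
        have hdrop : (c :: t ++ r).drop 3 = (c :: t).drop 3 ++ r :=
          List.drop_append_of_le_length hlen
        rw [show (c :: t) ++ r = c :: (t ++ r) by simp] at hp hdrop ⊢
        rw [cntAcs, if_pos hp, hdrop]
        rw [cntAcs, if_pos hpw]
        have hlen' : ((c :: t).drop 3).length ≤ n := by
          simp only [List.length_drop]
          simp at hn ⊢; omega
        rw [ih _ hlen' (fun x hx => hw x (List.mem_of_mem_drop hx))]
        omega
      · have hpw : ['a', 'c', 's'].isPrefixOf (c :: t) = false := by
          by_contra h
          simp only [Bool.not_eq_false] at h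
          apply hp
          rw [List.isPrefixOf_iff_prefix] at h ⊢
          exact h.trans ⟨r, by simp⟩
        rw [show (c :: t) ++ r = c :: (t ++ r) by simp] at hp ⊢
        rw [cntAcs, if_neg hp]
        rw [cntAcs, if_neg (by simp [hpw])]
        exact ih t (by simp at hn ⊢; omega) (fun x hx => hw x (by simp [hx]))

def sumCnt (xs : List (List Char)) : Nat := (xs.map cntAcs).sum

theorem sumCnt_reverse (xs : List (List Char)) : sumCnt xs.reverse = sumCnt xs := by
  simp [sumCnt]

theorem split₀go_sum (s cur acc : _) (hcur : ∀ c ∈ cur, PySem.Chars.isspace c = false) :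
    sumCnt (PySem.Chars.split₀.go s cur acc) = sumCnt acc + cntAcs (cur.reverse ++ s) := by
  induction s generalizing cur acc with
  | nil =>
    rw [PySem.Chars.split₀.go]
    by_cases hc : cur.isEmpty = true
    · rw [if_pos hc, sumCnt_reverse]
      have : cur = [] := by simpa [List.isEmpty_iff] using hc
      subst this; simp [cntAcs]
    · rw [if_neg hc, sumCnt_reverse]
      simp [sumCnt]; omega
  | cons c rest ih =>
    rw [PySem.Chars.split₀.go]
    by_cases hc : PySem.Chars.isspace c = true
    · rw [if_pos hc]
      have hsplit : cntAcs (cur.reverse ++ c :: rest) = cntAcs cur.reverse + cntAcs rest := by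
        rw [cntAcs_append cur.reverse.length cur.reverse (c :: rest) le_rfl
          (fun x hx => hcur x (List.mem_reverse.mp hx)) (Or.inr ⟨c, rest, rfl, hc⟩)]
        rw [cntAcs_cons_space c rest hc]
      by_cases hce : cur.isEmpty = true
      · rw [if_pos hce]
        have : cur = [] := by simpa [List.isEmpty_iff] using hce
        subst this
        rw [ih [] acc (by simp)]
        simp [cntAcs_cons_space c rest hc]
      · rw [if_neg hce]
        rw [ih [] (cur.reverse :: acc) (by simp)]
        simp only [List.reverse_nil, List.nil_append]
        rw [hsplit]
        simp [sumCnt]; omega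
    · rw [if_neg hc]
      rw [ih (c :: cur) acc ?_]
      · rw [show (c :: cur).reverse = cur.reverse ++ [c] by simp]
        rw [List.append_assoc]
        rfl
      · intro x hx
        rcases List.mem_cons.mp hx with h | h
        · subst h; simp only [Bool.not_eq_true] at hc; exact hc
        · exact hcur x h

theorem sumCnt_split₀ (t : List Char) : sumCnt (PySem.Chars.split₀ t) = cntAcs t := by
  rw [PySem.Chars.split₀, split₀go_sum t [] [] (by simp)]
  simp [sumCnt]

theorem cntAcs_eq_zero_of_not_isIn (w : List Char)
    (h : PySem.Chars.isIn ['a', 'c', 's'] w = false) : cntAcs w = 0 := by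
  by_contra hne
  have h' : ¬ ∃ j, ['a', 'c', 's'] <+: List.drop j w := by
    rw [PySem.Chars.exists_prefix_drop_iff_isIn]; simp [h]
  apply h'
  clear h h'
  induction w with
  | nil => simp [cntAcs] at hne
  | cons c t ih =>
    rw [cntAcs] at hne
    by_cases hp : ['a', 'c', 's'].isPrefixOf (c :: t) = true
    · exact ⟨0, by simpa using List.isPrefixOf_iff_prefix.mp hp⟩
    · rw [if_neg hp] at hne
      obtain ⟨j, hj⟩ := ih hne
      exact ⟨j + 1, by simpa using hj⟩

theorem foldl_guard_sum (ws : List String) (a : Int) :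
    ws.foldl
      (fun count word =>
        if PySem.Str.isIn "acs" word = true then
          let countInWord : Int := (PySem.Str.count word "acs" : Nat)
          count + countInWord
        else count) a
    = a + (sumCnt (ws.map String.toList) : Int) := by
  induction ws generalizing a with
  | nil => simp [sumCnt]
  | cons w rest ih =>
    simp only [List.foldl_cons, ih]
    have hw : "acs".toList = ['a', 'c', 's'] := rfl
    by_cases h : PySem.Str.isIn "acs" w = true
    · rw [if_pos h]
      simp only [PySem.Str.count_eq, hw, count_eq_cntAcs]
      simp [sumCnt]
      ring
    · rw [if_neg h]
      have hz : cntAcs w.toList = 0 := by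
        apply cntAcs_eq_zero_of_not_isIn
        rw [Bool.not_eq_true, PySem.Str.isIn_eq, hw] at h
        exact h
      simp [sumCnt, hz]

-- ===== VERDICT (by name: the statement is the Claim_ definition above) =====
theorem countInitials_spec : Claim_equal_countInitials := by
  intro s _
  unfold Spec_countInitials countInitials countInitials_alt
  simp only []
  rw [foldl_guard_sum]
  rw [PySem.Str.split₀_map_toList, sumCnt_split₀]
  rw [PySem.Str.count_eq, PySem.Str.toList_lower]
  rw [show "acs".toList = ['a', 'c', 's'] from rfl, count_eq_cntAcs]
  simp
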